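-- pv_equiv track=rewrite | github.com/bogdanevropin/Euler_project_tasks | Euler_26_2.py | find_rep
-- ===== SOURCE A (Python) =====
-- def find_rep(s):
--     l = len(s)
--     start = 0
--     end = 1
--     p0 = s[start:end]
--     for i in range(end, l - start):
--         p1 = s[i:i+len(p0)]
--         if p0 != p1:
--             break
--     else:
--         return p0
--     return '0'
--
--
--
--
--     return '0'
-- ===== SOURCE B (Python) =====
-- def find_rep(s):
--     p = s[:1]
--     return p if s == p * len(s) else '0'
-- ===== Notes on version B (the rewrite author's own statement) =====
-- stated objective: alternative
-- what changed: Replaced the index loop comparing each one-char slice to the first (early break) by a generate-and-compare: build the candidate string p * len(s) by string repetition and test whole-string equality, no per-character scan or early exit.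
import Mathlib
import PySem

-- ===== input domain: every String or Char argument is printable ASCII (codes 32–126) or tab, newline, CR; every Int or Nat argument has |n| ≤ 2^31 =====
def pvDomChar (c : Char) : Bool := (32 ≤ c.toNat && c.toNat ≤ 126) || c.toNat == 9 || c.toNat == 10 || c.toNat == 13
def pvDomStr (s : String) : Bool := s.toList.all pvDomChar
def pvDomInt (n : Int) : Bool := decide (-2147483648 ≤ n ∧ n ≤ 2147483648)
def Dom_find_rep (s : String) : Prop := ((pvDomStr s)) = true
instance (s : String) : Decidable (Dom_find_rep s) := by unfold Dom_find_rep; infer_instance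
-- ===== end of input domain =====

-- B replaces A's index loop (compare each one-char slice s[i:i+1] to s[:1] with an early break)
-- by a generate-and-compare: build p * len(s) by string repetition and test whole-string equality; alternative, same O(n) cost.


-- ===== PORT A =====
-- A's for-loop with break/else: returns p0 if no index broke, "0" on the first break
def findRepLoop (s p0 : String) : List Int → String
  | [] => p0
  | i :: rest =>
    let p1 := PySem.Str.slice s (some i) (some (i + PySem.Str.len p0))
    if p0 ≠ p1 then "0" else findRepLoop s p0 rest

def find_rep (s : String) : String :=
  let l := PySem.Str.len s
  let start : Int := 0
  let «end» : Int := 1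
  let p0 := PySem.Str.slice s (some start) (some «end»)
  findRepLoop s p0 (PySem.List.pyRange «end» (l - start) 1)

-- ===== PORT B =====
def find_rep_alt (s : String) : String :=
  let p := PySem.Str.slice s none (some 1)
  -- p * len(s): Python string repetition, ported via PySem.List.pyRepeat on the char list
  if s = String.ofList (PySem.List.pyRepeat p.toList (PySem.Str.len s)) then p else "0"

-- ===== PRECONDITION & SPEC =====
def Spec_find_rep (s : String) (out : String) : Prop := out = find_rep_alt s
instance (s : String) (out : String) : Decidable (Spec_find_rep s out) := by unfold Spec_find_rep; infer_instance

-- ===== CLAIM (what is proved, stated in full; the proofs are below) =====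
def Claim_equal_find_rep : Prop := ∀ (s : String), Dom_find_rep s → Spec_find_rep s (find_rep s)

-- ===== LEMMAS AND PROOFS =====

-- the loop returns p0 iff every visited one-slice equals p0
theorem loop_eq (s p0 : String) (idxs : List Int) :
    findRepLoop s p0 idxs =
      if ∀ i ∈ idxs, p0 = PySem.Str.slice s (some i) (some (i + PySem.Str.len p0)) then p0 else "0" := by
  induction idxs with
  | nil => simp [findRepLoop]
  | cons i rest ih =>
    simp only [findRepLoop, ih, List.forall_mem_cons, ne_eq, ite_not]
    split_ifs with h1 h2 h3 <;> first | rfl | tauto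

theorem slice_getElem (s : String) (c : Char) (rest : List Char) (hcs : s.toList = c :: rest)
    (j : Nat) (hj : j < rest.length) :
    (PySem.Str.slice s (some ((j : Int) + 1)) (some ((j : Int) + 1 + 1))).toList = [rest[j]] := by
  rw [PySem.Str.toList_slice, PySem.Chars.slice_eq_listSlice, hcs]
  have h1 : ((j : Int) + 1) = ((j + 1 : Nat) : Int) := by push_cast; ring
  have h2 : ((j : Int) + 1 + 1) = ((j + 2 : Nat) : Int) := by push_cast; ring
  rw [h2, h1, PySem.List.slice_natCast]
  have h3 : (j + 2) - (j + 1) = 1 := by omega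
  rw [h3, List.drop_succ_cons, List.drop_eq_getElem_cons hj, List.take_succ_cons, List.take_zero]

theorem slice_head (s : String) (c : Char) (rest : List Char) (hcs : s.toList = c :: rest) :
    (PySem.Str.slice s (some 0) (some 1)).toList = [c] := by
  rw [PySem.Str.toList_slice, PySem.Chars.slice_eq_listSlice, hcs,
    PySem.List.slice_zero_start]
  have h1 : (1 : Int) = ((1 : Nat) : Int) := rfl
  rw [h1, PySem.List.slice_to_natCast]
  rfl

-- the loop's stopping condition is "every later character equals the first"
theorem cond_iff (s : String) (c : Char) (rest : List Char) (hcs : s.toList = c :: rest) :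
    (∀ i ∈ PySem.List.pyRange 1 (((rest.length + 1 : Nat) : Int) - 0) 1,
       PySem.Str.slice s (some 0) (some 1) = PySem.Str.slice s (some i) (some (i + 1)))
    ↔ ∀ x ∈ rest, x = c := by
  constructor
  · intro h x hx
    obtain ⟨j, hj, hxj⟩ := List.mem_iff_getElem.mp hx
    have hmem : ((j : Int) + 1) ∈ PySem.List.pyRange 1 (((rest.length + 1 : Nat) : Int) - 0) 1 := by
      rw [PySem.List.mem_pyRange_one]
      constructor <;> [omega; (push_cast; omega)]
    have := h _ hmem
    rw [← String.toList_inj, slice_head s c rest hcs, slice_getElem s c rest hcs j hj] at this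
    rw [← hxj]
    exact (List.cons.injEq _ _ _ _ ▸ this).1.symm
  · intro h i hi
    rw [PySem.List.mem_pyRange_one] at hi
    have hlen : (0 : Int) ≤ (rest.length : Int) := by positivity
    set j : Nat := (i - 1).toNat with hjdef
    have hij : i = (j : Int) + 1 := by omega
    have hj : j < rest.length := by omega
    rw [← String.toList_inj, slice_head s c rest hcs, hij, slice_getElem s c rest hcs j hj]
    have := h rest[j] (List.getElem_mem hj)
    rw [this]

-- B's generate-and-compare condition is the same "every later character equals the first"
theorem repl_iff (s : String) (c : Char) (rest : List Char) (hcs : s.toList = c :: rest)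
    (hp : (PySem.Str.slice s none (some 1)).toList = [c]) :
    (s = String.ofList (PySem.List.pyRepeat (PySem.Str.slice s none (some 1)).toList (PySem.Str.len s)))
    ↔ ∀ x ∈ rest, x = c := by
  have hlen : PySem.Str.len s = ((rest.length + 1 : Nat) : Int) := by
    rw [PySem.Str.len_eq, hcs]; simp
  rw [← String.toList_inj, hcs, hp, hlen, PySem.List.pyRepeat_singleton]
  have ht : ((rest.length + 1 : Nat) : Int).toNat = rest.length + 1 := by omega
  rw [ht]
  simp only [List.replicate_succ, String.toList_ofList, List.cons.injEq, true_and]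
  exact List.eq_replicate_iff.trans (by simp)

theorem find_rep_main (s : String) : find_rep s = find_rep_alt s := by
  rcases hcs : s.toList with _ | ⟨c, rest⟩
  · have hs : s = "" := String.toList_inj.mp (by simp [hcs])
    subst hs; decide
  · unfold find_rep find_rep_alt
    rw [loop_eq]
    have hlen : PySem.Str.len s = ((rest.length + 1 : Nat) : Int) := by
      rw [PySem.Str.len_eq, hcs]; simp
    have hp0len : PySem.Str.len (PySem.Str.slice s (some 0) (some 1)) = 1 := by
      rw [PySem.Str.len_eq, slice_head s c rest hcs]; rfl
    have hp : (PySem.Str.slice s none (some 1)).toList = [c] := by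
      rw [PySem.Str.toList_slice, PySem.Chars.slice_eq_listSlice, hcs]
      have h1 : (1 : Int) = ((1 : Nat) : Int) := rfl
      rw [h1, PySem.List.slice_to_natCast]
      rfl
    have hout : PySem.Str.slice s (some 0) (some 1) = PySem.Str.slice s none (some 1) := by
      rw [← String.toList_inj, slice_head s c rest hcs, hp]
    have halt :
        (let p := PySem.Str.slice s none (some 1);
         if s = String.ofList (PySem.List.pyRepeat p.toList (PySem.Str.len s)) then p else "0")
        = if s = String.ofList (PySem.List.pyRepeat (PySem.Str.slice s none (some 1)).toList (PySem.Str.len s))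
            then PySem.Str.slice s none (some 1) else "0" := rfl
    rw [hp0len, halt]
    rw [if_congr (repl_iff s c rest hcs hp) rfl rfl]
    rw [hlen, if_congr (cond_iff s c rest hcs) rfl rfl]
    rw [hout]

-- ===== VERDICT (by name: the statement is the Claim_ definition above) =====
theorem find_rep_spec : Claim_equal_find_rep := by
  intro s _
  exact find_rep_main s
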